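-- pv_equiv track=rewrite | github.com/mwboiss/DSI-Prep | inter_py/letter_idx.py | letter_idx
-- ===== SOURCE A (Python) =====
-- def letter_idx(word):
--     # This is the vowel index accumulator
--     vowel_dict = {}
--
--     # Use 'enumerate' since both index and character are used
--     # Use 'word.lower()' since the function should be case-insensitive
--     for idx, char in enumerate(word.lower()):
--         if char in "aeiouy":
--             # If the vowel is already in the dictionary, append the index
--             if char in vowel_dict:
--                 vowel_dict[char].append(idx)
--             # Otherwise, initialize the dictionary key with a new list containing the index
--             else:
--                 vowel_dict[char] = [idx]
--
--     return vowel_dict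
-- ===== SOURCE B (Python) =====
-- def letter_idx(word):
--     # Alternative decomposition: fix the key order first (distinct vowels in
--     # first-occurrence order), then regroup with one scan per distinct vowel,
--     # instead of A's single-pass bucketing into a growing dict.
--     w = word.lower()
--     order = dict.fromkeys(c for c in w if c in "aeiouy")
--     return {v: [i for i, c in enumerate(w) if c == v] for v in order}
-- ===== Notes on version B (the rewrite author's own statement) =====
-- stated objective: alternative
-- what changed: B first computes the distinct vowels of word.lower() in first-occurrence order with dict.fromkeys, then builds each vowel's index list by a separate enumerate scan, replacing A's single-pass dict bucketing (membership test + append/initialise per character).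
import Mathlib
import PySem

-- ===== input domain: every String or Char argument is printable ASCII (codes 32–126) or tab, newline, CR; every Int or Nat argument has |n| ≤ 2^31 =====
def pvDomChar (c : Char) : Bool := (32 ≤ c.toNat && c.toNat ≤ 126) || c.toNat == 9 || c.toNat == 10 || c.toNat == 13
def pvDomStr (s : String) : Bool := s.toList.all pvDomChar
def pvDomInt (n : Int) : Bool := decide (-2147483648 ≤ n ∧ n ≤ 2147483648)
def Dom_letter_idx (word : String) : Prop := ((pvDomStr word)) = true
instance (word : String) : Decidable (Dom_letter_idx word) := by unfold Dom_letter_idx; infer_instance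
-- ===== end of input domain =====

-- B replaces A's single-pass dict bucketing by "distinct vowels first, then one scan per vowel" (alternative decomposition, same cost).

-- ===== PORT A =====
-- Python's chars are 1-char strings: the dict is built over Char, step for step as in A,
-- and its keys are rendered as 1-char Strings at the end (type convention dict[str, list[int]]).
-- `char in "aeiouy"` on a single char is exactly membership in "aeiouy".toList.
def letter_idx (word : String) : List (String × List Int) :=
  (((PySem.List.enumerate (PySem.Str.lower word).toList).foldl
      (fun d (p : Int × Char) =>
        if p.2 ∈ "aeiouy".toList then
          match PySem.Dict.get? d p.2 with
          | some l => PySem.Dict.insert d p.2 (l ++ [p.1])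
          | none   => PySem.Dict.insert d p.2 [p.1]
        else d)
      PySem.Dict.empty).items).map (fun q => (String.ofList [q.1], q.2))

-- ===== PORT B =====
def letter_idx_alt (word : String) : List (String × List Int) :=
  (PySem.List.dedup (((PySem.Str.lower word).toList).filter
      (fun c => c ∈ "aeiouy".toList))).map
    (fun v => (String.ofList [v],
      (PySem.List.enumerate (PySem.Str.lower word).toList).filterMap
        (fun p => if p.2 = v then some p.1 else none)))

-- ===== PRECONDITION & SPEC =====
def Spec_letter_idx (word : String) (out : List (String × List Int)) : Prop := out = letter_idx_alt word
instance (word : String) (out : List (String × List Int)) : Decidable (Spec_letter_idx word out) := by unfold Spec_letter_idx; infer_instance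

-- ===== CLAIM (what is proved, stated in full; the proofs are below) =====
def Claim_equal_letter_idx : Prop := ∀ (word : String), Dom_letter_idx word → Spec_letter_idx word (letter_idx word)

-- ===== LEMMAS AND PROOFS =====

-- abbreviations for the two ports' inner computations (proof-side only)
def pvStep (d : PySem.Dict Char (List Int)) (p : Int × Char) : PySem.Dict Char (List Int) :=
  if p.2 ∈ "aeiouy".toList then
    match PySem.Dict.get? d p.2 with
    | some l => PySem.Dict.insert d p.2 (l ++ [p.1])
    | none   => PySem.Dict.insert d p.2 [p.1]
  else d

def pvIdxs (v : Char) (w : List Char) : List Int :=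
  (PySem.List.enumerate w).filterMap (fun p => if p.2 = v then some p.1 else none)

def pvVow (w : List Char) : List Char :=
  PySem.Set.ofList (w.filter (fun c => c ∈ "aeiouy".toList))

lemma pvVow_append_vowel (t : List Char) (c : Char) (hv : c ∈ "aeiouy".toList) :
    pvVow (t ++ [c]) = PySem.Set.add (pvVow t) c := by
  have hd : (decide (c ∈ "aeiouy".toList)) = true := by simpa using hv
  simp only [pvVow, List.filter_append, List.filter_cons, List.filter_nil, hd, if_true]
  exact PySem.Set.ofList_append_singleton _ _

lemma pvVow_append_nonvowel (t : List Char) (c : Char) (hv : c ∉ "aeiouy".toList) :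
    pvVow (t ++ [c]) = pvVow t := by
  have hd : (decide (c ∈ "aeiouy".toList)) = false := by simpa using hv
  simp only [pvVow, List.filter_append, List.filter_cons, List.filter_nil, hd,
    Bool.false_eq_true, if_false, List.append_nil]

lemma mem_vowels_of_mem_pvVow (w : List Char) (v : Char) (h : v ∈ pvVow w) :
    v ∈ "aeiouy".toList := by
  have := (List.mem_filter.1 ((PySem.Set.mem_ofList _ _).1 h)).2
  exact of_decide_eq_true this

lemma pvIdxs_append_singleton (v : Char) (t : List Char) (c : Char) :
    pvIdxs v (t ++ [c]) = pvIdxs v t ++ (if c = v then [(t.length : Int)] else []) := by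
  by_cases h : c = v <;>
    simp [pvIdxs, PySem.List.enumerate_append, PySem.List.enumerate_cons,
      PySem.List.enumerate_nil, List.filterMap_append, h]

lemma pvIdxs_eq_nil_of_not_mem (v : Char) (t : List Char) (h : v ∉ t) :
    pvIdxs v t = [] := by
  rw [pvIdxs, List.filterMap_eq_nil_iff]
  intro p hp
  rcases (PySem.List.mem_enumerate_iff _ _ _).1 hp with ⟨k, hk, rfl⟩
  have hne : t[k] ≠ v := fun he => h (he ▸ t.getElem_mem hk)
  simp [hne]

lemma pvVow_core (w : List Char) :
    ((PySem.List.enumerate w).foldl pvStep PySem.Dict.empty).items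
      = (pvVow w).map (fun v => (v, pvIdxs v w)) := by
  induction w using List.reverseRecOn with
  | nil => simp [PySem.List.enumerate_nil, pvVow, PySem.Set.ofList, PySem.Dict.empty]
  | append_singleton t c ih =>
    have hkeys : ((PySem.List.enumerate t).foldl pvStep PySem.Dict.empty).keys = pvVow t := by
      simp [PySem.Dict.keys, ih, List.map_map, Function.comp_def]
    rw [PySem.List.enumerate_append, List.foldl_append]
    simp only [PySem.List.enumerate_cons, PySem.List.enumerate_nil, List.foldl_cons, List.foldl_nil,
      zero_add]
    by_cases hv : c ∈ "aeiouy".toList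
    · have hnd : ((PySem.List.enumerate t).foldl pvStep PySem.Dict.empty).keys.Nodup := by
        rw [hkeys]; exact PySem.Set.nodup_ofList _
      by_cases hc : c ∈ pvVow t
      · -- c already a key: Python appends to the existing list
        have hget : PySem.Dict.get? ((PySem.List.enumerate t).foldl pvStep PySem.Dict.empty) c
            = some (pvIdxs c t) := by
          apply PySem.Dict.get?_of_mem_items _ _ hnd
          rw [ih]
          exact List.mem_map.2 ⟨c, hc, rfl⟩
        have hcont : ((PySem.List.enumerate t).foldl pvStep PySem.Dict.empty).contains c = true := by
          rw [PySem.Dict.contains_eq_isSome_get?, hget]; rfl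
        rw [pvStep, if_pos hv, hget]
        rw [PySem.Dict.items_insert_of_contains _ _ hcont, ih]
        have hVow : pvVow (t ++ [c]) = pvVow t := by
          rw [pvVow_append_vowel t c hv, PySem.Set.add_of_mem hc]
        rw [hVow, List.map_map]
        apply List.map_congr_left
        intro v hvm
        by_cases hvc : v = c
        · subst hvc
          simp [pvIdxs_append_singleton]
        · simp only [Function.comp]
          rw [if_neg (by simp [hvc]), pvIdxs_append_singleton, if_neg (fun h => hvc h.symm),
            List.append_nil]
      · -- new vowel: Python starts a fresh list, the key appends
        have hget : PySem.Dict.get? ((PySem.List.enumerate t).foldl pvStep PySem.Dict.empty) c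
            = none := by
          rw [PySem.Dict.get?_eq_none_iff_not_mem_keys, hkeys]; exact hc
        have hcont : ((PySem.List.enumerate t).foldl pvStep PySem.Dict.empty).contains c = false := by
          rw [PySem.Dict.contains_eq_isSome_get?, hget]; rfl
        rw [pvStep, if_pos hv, hget]
        rw [PySem.Dict.items_insert_of_not_contains _ _ hcont, ih]
        have hct : c ∉ t := by
          intro hmem
          exact hc ((PySem.Set.mem_ofList _ _).2 (List.mem_filter.2 ⟨hmem, by simpa using hv⟩))
        have hVow : pvVow (t ++ [c]) = pvVow t ++ [c] := by
          rw [pvVow_append_vowel t c hv, PySem.Set.add_of_not_mem hc]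
        rw [hVow, List.map_append]
        congr 1
        · apply List.map_congr_left
          intro v hvm
          have hvc : v ≠ c := fun h => hc (h ▸ hvm)
          rw [pvIdxs_append_singleton, if_neg (fun h => hvc h.symm), List.append_nil]
        · simp [pvIdxs_append_singleton, pvIdxs_eq_nil_of_not_mem c t hct]
    · -- not a vowel: the dict is unchanged and no index list changes
      rw [pvStep, if_neg hv, ih]
      rw [pvVow_append_nonvowel t c hv]
      apply List.map_congr_left
      intro v hvm
      have hvc : v ≠ c := fun h => hv (h ▸ mem_vowels_of_mem_pvVow t v hvm)
      rw [pvIdxs_append_singleton, if_neg (fun h => hvc h.symm), List.append_nil]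

-- ===== VERDICT (by name: the statement is the Claim_ definition above) =====
theorem letter_idx_spec : Claim_equal_letter_idx := by
  intro word _
  show letter_idx word = letter_idx_alt word
  rw [letter_idx, letter_idx_alt]
  show ((((PySem.List.enumerate (PySem.Str.lower word).toList).foldl pvStep
      PySem.Dict.empty).items).map (fun q => (String.ofList [q.1], q.2)))
    = (pvVow (PySem.Str.lower word).toList).map
        (fun v => (String.ofList [v], pvIdxs v (PySem.Str.lower word).toList))
  rw [pvVow_core, List.map_map]
  rfl
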